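-- pv_equiv track=rewrite | github.com/yingzhang121/Tolypocladium_inflatum_paper | crude_search_inversion.py | find_idexes
-- ===== SOURCE A (Python) =====
-- def find_idexes( strands, match ):
--
--     idxst = []
--     idxend = []
--     direction = match
--     i = 0
--     while i < len(strands):
--         try: idx = strands[i:].index( match )
--         except: break
--         if match == direction: idxst.append( idx+i )
--         else: idxend.append( idx+i )
--         i += idx+1
--         match = 0-match
--     if len( idxst ) != len( idxend ):
--         idxend.append( len(strands) )
--
--     return idxst, idxend
-- ===== SOURCE B (Python) =====
-- def find_idexes(strands, match):
--     # Single forward pass with a toggling 'cur' target, instead of repeated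
--     # suffix-slice .index scans.
--     idxst = []
--     idxend = []
--     cur = match
--     for i, v in enumerate(strands):
--         if v == cur:
--             if cur == match:
--                 idxst.append(i)
--             else:
--                 idxend.append(i)
--             cur = 0 - cur
--     if len(idxst) != len(idxend):
--         idxend.append(len(strands))
--     return idxst, idxend
-- ===== Notes on version B (the rewrite author's own statement) =====
-- stated objective: alternative
-- what changed: Replaced the while-loop that repeatedly slices the list and rescans it with .index by one forward pass over enumerate(strands) that maintains a toggling current-target value.
import Mathlib
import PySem

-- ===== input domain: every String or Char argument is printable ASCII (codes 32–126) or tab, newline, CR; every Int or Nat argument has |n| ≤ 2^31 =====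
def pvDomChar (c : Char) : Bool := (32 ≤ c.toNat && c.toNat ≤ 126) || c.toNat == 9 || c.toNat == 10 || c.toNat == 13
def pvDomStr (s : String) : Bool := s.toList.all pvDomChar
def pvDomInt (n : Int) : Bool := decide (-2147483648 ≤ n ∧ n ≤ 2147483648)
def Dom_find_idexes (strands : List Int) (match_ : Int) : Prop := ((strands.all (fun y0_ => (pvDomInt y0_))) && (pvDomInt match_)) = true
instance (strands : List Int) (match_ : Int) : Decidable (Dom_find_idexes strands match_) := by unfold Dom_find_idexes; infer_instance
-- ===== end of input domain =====

-- B replaces A's repeated slice-and-.index rescans by one forward pass with a toggling target (alternative single-pass formulation).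

-- ===== PORT A =====
-- the while loop of A: state (match_, i, idxst, idxend); direction is fixed
def find_idexes_loop (strands : List Int) (direction : Int) (m : Int) (i : Nat)
    (idxst idxend : List Int) : List Int × List Int :=
  if _h : i < strands.length then
    match PySem.List.index? (PySem.List.slice strands (some (i : Int)) none) m with
    | none => (idxst, idxend)  -- the except: break
    | some idx =>
      if m = direction then
        find_idexes_loop strands direction (0 - m) (i + idx + 1) (idxst ++ [(idx : Int) + (i : Int)]) idxend
      else
        find_idexes_loop strands direction (0 - m) (i + idx + 1) idxst (idxend ++ [(idx : Int) + (i : Int)])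
  else (idxst, idxend)
termination_by strands.length - i
decreasing_by all_goals omega

def find_idexes (strands : List Int) (match_ : Int) : List Int × List Int :=
  let r := find_idexes_loop strands match_ match_ 0 [] []
  if r.1.length ≠ r.2.length then (r.1, r.2 ++ [(strands.length : Int)]) else r

-- ===== PORT B =====
-- one step of B's for-loop over enumerate(strands); state (cur, idxst, idxend)
def altStep (match_ : Int) (s : Int × List Int × List Int) (iv : Int × Int) :
    Int × List Int × List Int :=
  if iv.2 = s.1 then
    if s.1 = match_ then (0 - s.1, s.2.1 ++ [iv.1], s.2.2)
    else (0 - s.1, s.2.1, s.2.2 ++ [iv.1])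
  else s

def find_idexes_alt (strands : List Int) (match_ : Int) : List Int × List Int :=
  let s := (PySem.List.enumerate strands 0).foldl (altStep match_) (match_, [], [])
  if s.2.1.length ≠ s.2.2.length then (s.2.1, s.2.2 ++ [(strands.length : Int)]) else s.2

-- ===== PRECONDITION & SPEC =====
def Spec_find_idexes (strands : List Int) (match_ : Int) (out : List Int × List Int) : Prop := out = find_idexes_alt strands match_
instance (strands : List Int) (match_ : Int) (out : List Int × List Int) : Decidable (Spec_find_idexes strands match_ out) := by unfold Spec_find_idexes; infer_instance

-- ===== CLAIM (what is proved, stated in full; the proofs are below) =====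
def Claim_equal_find_idexes : Prop := ∀ (strands : List Int) (match_ : Int), Dom_find_idexes strands match_ → Spec_find_idexes strands match_ (find_idexes strands match_)

-- ===== LEMMAS AND PROOFS =====

-- skipping a non-matching element does not change A's loop
theorem find_idexes_loop_skip (strands : List Int) (direction m : Int) (i : Nat)
    (v : Int) (rest : List Int) (hd : strands.drop i = v :: rest) (hv : v ≠ m)
    (idxst idxend : List Int) :
    find_idexes_loop strands direction m i idxst idxend =
    find_idexes_loop strands direction m (i + 1) idxst idxend := by
  have hi : i < strands.length := by
    have hlen := congrArg List.length hd
    simp at hlen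
    omega
  have hs : PySem.List.slice strands (some (i : Int)) none = v :: rest := by
    rw [PySem.List.slice_from_natCast, hd]
  have hs' : PySem.List.slice strands (some ((i + 1 : Nat) : Int)) none = rest := by
    rw [PySem.List.slice_from_natCast]
    have := congrArg List.tail hd
    simpa using this
  rw [find_idexes_loop, find_idexes_loop]
  rw [dif_pos hi]
  rw [hs, PySem.List.index?_cons_of_ne rest hv]
  cases hk : PySem.List.index? rest m with
  | none =>
    simp only [Option.map_none]
    by_cases h2 : i + 1 < strands.length
    · rw [dif_pos h2, hs', hk]
    · rw [dif_neg h2]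
  | some k =>
    simp only [Option.map_some]
    have h2 : i + 1 < strands.length := by
      have hmem : m ∈ rest := (PySem.List.index?_isSome_iff rest m).mp (by rw [hk]; rfl)
      have hpos : 0 < rest.length := List.length_pos_of_mem hmem
      have hlen := congrArg List.length hd
      simp at hlen
      omega
    rw [dif_pos h2, hs', hk]
    have e1 : i + (k + 1) + 1 = i + 1 + k + 1 := by omega
    have e2 : ((k + 1 : Nat) : Int) + (i : Int) = (k : Int) + ((i + 1 : Nat) : Int) := by
      push_cast; ring
    rw [e1, e2]

-- A's loop from position i equals B's fold over enumerate of the remaining suffix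
theorem loop_eq_fold (strands : List Int) (direction : Int) :
    ∀ (l : List Int) (i : Nat), strands.drop i = l →
    ∀ (m : Int) (st en : List Int),
    find_idexes_loop strands direction m i st en =
      (((PySem.List.enumerate l (i : Int)).foldl (altStep direction) (m, st, en)).2.1,
       ((PySem.List.enumerate l (i : Int)).foldl (altStep direction) (m, st, en)).2.2) := by
  intro l
  induction l with
  | nil =>
    intro i hd m st en
    have hi : ¬ i < strands.length := by
      have := congrArg List.length hd
      simp at this
      omega
    rw [find_idexes_loop, dif_neg hi]
    simp [PySem.List.enumerate_nil]
  | cons v rest ih =>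
    intro i hd m st en
    by_cases hv : v = m
    · subst hv
      have hi : i < strands.length := by
        have hlen := congrArg List.length hd
        simp at hlen
        omega
      have hs : PySem.List.slice strands (some (i : Int)) none = v :: rest := by
        rw [PySem.List.slice_from_natCast, hd]
      have hrest : strands.drop (i + 1) = rest := by
        have := congrArg List.tail hd
        simpa using this
      rw [find_idexes_loop, dif_pos hi, hs, PySem.List.index?_cons_self]
      rw [PySem.List.enumerate_cons, List.foldl_cons]
      simp only [altStep, if_true, Nat.add_zero, Nat.cast_zero, zero_add]
      by_cases hm : v = direction
      · rw [if_pos hm, if_pos hm]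
        have := ih (i + 1) hrest (0 - v) (st ++ [(i : Int)]) en
        push_cast at this
        exact this
      · rw [if_neg hm, if_neg hm]
        have := ih (i + 1) hrest (0 - v) st (en ++ [(i : Int)])
        push_cast at this
        exact this
    · have hrest : strands.drop (i + 1) = rest := by
        have := congrArg List.tail hd
        simpa using this
      rw [find_idexes_loop_skip strands direction m i v rest hd (fun h => hv h) st en]
      rw [PySem.List.enumerate_cons, List.foldl_cons]
      simp only [altStep, if_neg (show ¬ v = m from hv)]
      have := ih (i + 1) hrest m st en
      simpa [Nat.add_comm] using this

-- ===== VERDICT (by name: the statement is the Claim_ definition above) =====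
theorem find_idexes_spec : Claim_equal_find_idexes := by
  intro strands match_ _
  unfold Spec_find_idexes find_idexes find_idexes_alt
  have h := loop_eq_fold strands match_ strands 0 rfl match_ [] []
  simp only [Nat.cast_zero] at h
  rw [h]
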